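-- pv_equiv track=rewrite | github.com/Temerold/music-downloader | src/music_downloader/sources/yt_dlp.py | remap_template_keys
-- ===== SOURCE A (Python) =====
-- from typing import Any, cast
--
-- TRACK_METADATA_ATTRIBUTE_MAP: dict[str, tuple[Any, Any] | Any] = {
--     "artist": ("uploader", None),
--     "album": ("title", None),
--     "album_artist": ("uploader", None),
--     # "genre": ("categories", None),
--     "date": ("upload_date", None),
--     # "synopsis": ("description", None),
--     "title": ("title", None),
--     "track": "1/1",  # Handle it as a single
--     "disc": "1/1",  # Handle it as a single
-- }
--
-- def remap_template_keys(template: str) -> str: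
--     yt_dlp_template: str = template
--     for ffmpeg_attribute, yt_dlp_attribute in TRACK_METADATA_ATTRIBUTE_MAP.items():
--         if isinstance(yt_dlp_attribute, tuple):
--             yt_dlp_attribute: Any = yt_dlp_attribute[0]
--         yt_dlp_template = yt_dlp_template.replace(
--             f"%({ffmpeg_attribute})s", f"%({yt_dlp_attribute})s"
--         )
--
--     return yt_dlp_template
-- ===== SOURCE B (Python) =====
-- from typing import Any
--
-- TRACK_METADATA_ATTRIBUTE_MAP: dict[str, tuple[Any, Any] | Any] = {
--     "artist": ("uploader", None),
--     "album": ("title", None),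
--     "album_artist": ("uploader", None),
--     "date": ("upload_date", None),
--     "title": ("title", None),
--     "track": "1/1",
--     "disc": "1/1",
-- }
--
--
-- def remap_template_keys(template: str) -> str:
--     # Flat key -> replacement-key map (tuple values contribute their first element).
--     mapping = {
--         k: (v[0] if isinstance(v, tuple) else v)
--         for k, v in TRACK_METADATA_ATTRIBUTE_MAP.items()
--     }
--     out: list[str] = []
--     i = 0
--     n = len(template)
--     while i < n:
--         # One left-to-right pass: at each '%(' try to read a full '%(<word>)s' token.
--         if template[i] == "%" and i + 1 < n and template[i + 1] == "(":
--             j = i + 2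
--             while j < n and (template[j].isalnum() or template[j] == "_"):
--                 j += 1
--             if j > i + 2 and j + 1 < n and template[j] == ")" and template[j + 1] == "s":
--                 key = template[i + 2 : j]
--                 out.append(f"%({mapping.get(key, key)})s")
--                 i = j + 2
--                 continue
--         out.append(template[i])
--         i += 1
--     return "".join(out)
-- ===== Notes on version B (the rewrite author's own statement) =====
-- stated objective: alternative
-- what changed: A makes seven sequential full-string str.replace passes (one per ffmpeg key); B builds one flat key->replacement dict and rewrites the template in a single left-to-right scan that parses each percent-key token of the form percent, open-paren, word, close-paren, s and maps its key through the dict, leaving unmapped tokens untouched.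
import Mathlib
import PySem

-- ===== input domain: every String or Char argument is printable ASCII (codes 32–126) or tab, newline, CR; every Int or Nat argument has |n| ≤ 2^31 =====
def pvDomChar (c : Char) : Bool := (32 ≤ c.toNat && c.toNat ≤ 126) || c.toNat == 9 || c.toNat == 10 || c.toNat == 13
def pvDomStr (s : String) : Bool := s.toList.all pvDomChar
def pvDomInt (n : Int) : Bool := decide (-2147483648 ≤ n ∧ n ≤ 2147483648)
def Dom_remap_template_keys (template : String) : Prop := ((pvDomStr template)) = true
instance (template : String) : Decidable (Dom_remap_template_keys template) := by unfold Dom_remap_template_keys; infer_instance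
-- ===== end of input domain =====

-- B replaces A's seven sequential full-string str.replace passes by ONE left-to-right scan that
-- parses each percent-key token and maps its key through a flat dict ('alternative' objective).

-- ===== PORT A =====
inductive TVal
  | tup : String → Option String → TVal   -- a Python tuple value ("uploader", None)
  | str : String → TVal                   -- a plain string value "1/1"
deriving DecidableEq, Repr

def TRACK_METADATA_ATTRIBUTE_MAP : PySem.Dict String TVal := PySem.Dict.mk
  [ ("artist", .tup "uploader" none),
    ("album", .tup "title" none),
    ("album_artist", .tup "uploader" none),
    ("date", .tup "upload_date" none),
    ("title", .tup "title" none),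
    ("track", .str "1/1"),
    ("disc", .str "1/1") ]

-- f"%({k})s", built at code-point level
def fmtKey (k : String) : String := String.ofList ('%' :: '(' :: (k.toList ++ [')', 's']))

def remap_template_keys (template : String) : String :=
  TRACK_METADATA_ATTRIBUTE_MAP.items.foldl (fun yt_dlp_template p =>
    let yt_dlp_attribute : String := match p.2 with
      | TVal.tup a _ => a        -- isinstance(v, tuple): take element 0
      | TVal.str s => s
    PySem.Str.replace yt_dlp_template (fmtKey p.1) (fmtKey yt_dlp_attribute)) template

-- ===== PORT B =====
def isW (c : Char) : Bool := c.isAlphanum || c == '_'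

-- the flat dict comprehension {k: (v[0] if isinstance(v, tuple) else v) for k, v in ...}
def mappingB : PySem.Dict String String :=
  PySem.Dict.ofList (TRACK_METADATA_ATTRIBUTE_MAP.items.map (fun p =>
    (p.1, match p.2 with | TVal.tup a _ => a | TVal.str s => s)))

-- the while-loop of Source B: indices i / j become the suffix lists t / (r.dropWhile isW)
def scanGo : List Char → List Char
  | [] => []
  | c :: t =>
    if c = '%' ∧ t.head? = some '(' then
      let r := t.tail
      if r.takeWhile isW ≠ [] ∧ (r.dropWhile isW).take 2 = [')', 's'] then
        '%' :: '(' :: ((mappingB.getD (String.ofList (r.takeWhile isW))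
            (String.ofList (r.takeWhile isW))).toList
          ++ ')' :: 's' :: scanGo ((r.dropWhile isW).drop 2))
      else c :: scanGo t
    else c :: scanGo t
termination_by l => l.length
decreasing_by
  · simp only [List.length_cons]
    have h1 : (List.dropWhile isW t.tail).length ≤ t.tail.length := (List.dropWhile_sublist _).length_le
    have h2 : t.tail.length ≤ t.length := by cases t <;> simp
    have h3 : ((List.dropWhile isW t.tail).drop 2).length ≤ (List.dropWhile isW t.tail).length := by
      simp [List.length_drop]
    omega
  · simp
  · simp

def remap_template_keys_alt (template : String) : String := String.ofList (scanGo template.toList)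

-- ===== PRECONDITION & SPEC =====
def Spec_remap_template_keys (template : String) (out : String) : Prop := out = remap_template_keys_alt template
instance (template : String) (out : String) : Decidable (Spec_remap_template_keys template out) := by unfold Spec_remap_template_keys; infer_instance

-- ===== CLAIM (what is proved, stated in full; the proofs are below) =====
def Claim_equal_remap_template_keys : Prop := ∀ (template : String), Dom_remap_template_keys template → Spec_remap_template_keys template (remap_template_keys template)

-- ===== LEMMAS AND PROOFS =====

-- "%(<k>)s" as a char list
def pat (k : List Char) : List Char := '%' :: '(' :: (k ++ [')', 's'])

-- one str.replace pass, as a plain well-founded recursion (proof-side mirror of Chars.replace)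
def pvRepl (p v : List Char) : List Char → List Char
  | [] => []
  | c :: t =>
    if p.isPrefixOf (c :: t) then v ++ pvRepl p v (t.drop (p.length - 1))
    else c :: pvRepl p v t
termination_by l => l.length
decreasing_by
  · simp only [List.length_cons, List.length_drop]; omega
  · simp

-- A's seven passes, in dict order
def pvA (l : List Char) : List Char :=
  pvRepl (pat "disc".toList) (pat "1/1".toList)
   (pvRepl (pat "track".toList) (pat "1/1".toList)
    (pvRepl (pat "title".toList) (pat "title".toList)
     (pvRepl (pat "date".toList) (pat "upload_date".toList)
      (pvRepl (pat "album_artist".toList) (pat "uploader".toList)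
       (pvRepl (pat "album".toList) (pat "title".toList)
        (pvRepl (pat "artist".toList) (pat "uploader".toList) l))))))

def keysL : List (List Char) :=
  ["artist".toList, "album".toList, "album_artist".toList, "date".toList,
   "title".toList, "track".toList, "disc".toList]

def NoTok (X : List Char) : Prop := ∀ k ∈ keysL, ¬ (k ++ [')', 's']) <+: X

lemma all_ne_pct {l : List Char} (h : l.all (fun c => !(c == '%')) = true) :
    ∀ c ∈ l, c ≠ '%' := by
  intro c hc
  simpa using List.all_eq_true.mp h c hc

lemma all_isW {l : List Char} (h : l.all isW = true) : ∀ c ∈ l, isW c = true :=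
  fun c hc => List.all_eq_true.mp h c hc

lemma go_eq_pvRepl (p v : List Char) (hp : p ≠ []) :
    ∀ (fuel : Nat) (l acc : List Char), l.length ≤ fuel →
      PySem.Chars.replace.go p v fuel l acc = acc.reverse ++ pvRepl p v l := by
  intro fuel
  induction fuel with
  | zero =>
    intro l acc h
    have hl : l = [] := by cases l <;> simp_all
    subst hl
    rw [pvRepl]
    simp [PySem.Chars.replace.go]
  | succ n ih =>
    intro l acc h
    cases l with
    | nil =>
      rw [pvRepl]
      simp [PySem.Chars.replace.go]
    | cons c t =>
      cases p with
      | nil => exact absurd rfl hp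
      | cons a q =>
        by_cases hpre : (a :: q).isPrefixOf (c :: t)
        · rw [pvRepl, if_pos hpre]
          have hstep : PySem.Chars.replace.go (a :: q) v (n + 1) (c :: t) acc =
              PySem.Chars.replace.go (a :: q) v n (List.drop (a :: q).length (c :: t)) (v.reverse ++ acc) := by
            simp [PySem.Chars.replace.go, hpre]
          rw [hstep, ih _ _ (by simp at h ⊢; omega)]
          simp [List.drop_succ_cons]
        · rw [pvRepl, if_neg hpre]
          have hstep : PySem.Chars.replace.go (a :: q) v (n + 1) (c :: t) acc =
              PySem.Chars.replace.go (a :: q) v n t (c :: acc) := by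
            simp [PySem.Chars.replace.go, hpre]
          rw [hstep, ih _ _ (by simp at h; omega)]
          simp


lemma pvRepl_not_prefix {p v : List Char} {c : Char} {t : List Char} (h : ¬ p <+: (c :: t)) :
    pvRepl p v (c :: t) = c :: pvRepl p v t := by
  have hb : p.isPrefixOf (c :: t) = false := by
    cases hb : p.isPrefixOf (c :: t)
    · rfl
    · exact absurd (List.isPrefixOf_iff_prefix.mp hb) h
  rw [pvRepl, hb]
  simp


lemma pvRepl_cons_ne {p v : List Char} {c : Char} {t : List Char}
    (hp : p.head? = some '%') (hc : c ≠ '%') :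
    pvRepl p v (c :: t) = c :: pvRepl p v t := by
  apply pvRepl_not_prefix
  intro hpre
  cases p with
  | nil => simp at hp
  | cons a q =>
    obtain ⟨s, hs⟩ := hpre
    simp at hp
    simp [hp] at hs
    exact hc hs.1.symm


lemma pvRepl_match {p v : List Char} (hp : p ≠ []) (t : List Char) :
    pvRepl p v (p ++ t) = v ++ pvRepl p v t := by
  cases p with
  | nil => exact absurd rfl hp
  | cons a q =>
    have hpre : (a :: q).isPrefixOf ((a :: q) ++ t) = true :=
      List.isPrefixOf_iff_prefix.mpr (List.prefix_append _ _)
    rw [List.cons_append, pvRepl]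
    rw [← List.cons_append, hpre]
    simp


lemma pvRepl_pass_noPct {p v : List Char} (hph : p.head? = some '%') :
    ∀ (x y : List Char), (∀ c ∈ x, c ≠ '%') → pvRepl p v (x ++ y) = x ++ pvRepl p v y := by
  intro x
  induction x with
  | nil => intro y _; simp
  | cons c x ih =>
    intro y hx
    rw [List.cons_append, pvRepl_cons_ne hph (hx c (by simp)), ih y (fun d hd => hx d (by simp [hd]))]
    simp


lemma pvRepl_pass_tok {p v q : List Char} (hph : p.head? = some '%') (hq : q.head? = some '%')
    (hqt : ∀ c ∈ q.tail, c ≠ '%')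
    (h : (¬ p <+: q ∧ ¬ q <+: p) ∨ (p = q ∧ v = q)) (y : List Char) :
    pvRepl p v (q ++ y) = q ++ pvRepl p v y := by
  rcases h with ⟨h1, h2⟩ | ⟨rfl, rfl⟩
  · have hnp : ¬ p <+: (q ++ y) := fun hp' =>
      (List.prefix_or_prefix_of_prefix hp' (List.prefix_append q y)).elim h1 h2
    cases q with
    | nil => simp at hq
    | cons b qt =>
      simp at hq
      subst hq
      rw [List.cons_append, pvRepl_not_prefix (by rw [← List.cons_append]; exact hnp)]
      rw [pvRepl_pass_noPct hph qt y (by simpa using hqt)]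
      simp
  · exact pvRepl_match (by rintro rfl; simp at hq) y


lemma keyclash : ∀ (k w : List Char), (∀ c ∈ k, isW c = true) → (∀ c ∈ w, isW c = true) →
    k ≠ w → ∀ (z y : List Char), ¬ ((k ++ ')' :: z) <+: (w ++ ')' :: y)) := by
  intro k
  induction k with
  | nil =>
    intro w hk hw hne z y h
    cases w with
    | nil => exact hne rfl
    | cons c w' =>
      rw [List.nil_append, List.cons_append, List.cons_prefix_cons] at h
      have := hw c (by simp)
      rw [← h.1] at this
      simp [isW] at this
  | cons a k' ih =>
    intro w hk hw hne z y h
    cases w with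
    | nil =>
      rw [List.cons_append, List.nil_append, List.cons_prefix_cons] at h
      have := hk a (by simp)
      rw [h.1] at this
      simp [isW] at this
    | cons b w' =>
      rw [List.cons_append, List.cons_append, List.cons_prefix_cons] at h
      exact ih w' (fun d hd => hk d (by simp [hd])) (fun d hd => hw d (by simp [hd]))
        (by intro he; exact hne (by rw [h.1, he])) z y h.2


lemma pvRepl_noNew {p v : List Char} (hv : v.head? = some '%') :
    ∀ (y u : List Char), u ≠ [] → (∀ c ∈ u, c ≠ '%') → ¬ u <+: y → ¬ u <+: pvRepl p v y := by
  have main : ∀ (m : Nat) (y : List Char), y.length ≤ m → ∀ (u : List Char), u ≠ [] →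
      (∀ c ∈ u, c ≠ '%') → ¬ u <+: y → ¬ u <+: pvRepl p v y := by
    intro m
    induction m with
    | zero =>
      intro y hy u hu _ hnp
      have : y = [] := by cases y <;> simp_all
      subst this
      rw [pvRepl]
      intro hpre
      exact hu (List.prefix_nil.mp hpre)
    | succ n ih =>
      intro y hy u hu hc hnp
      cases y with
      | nil =>
        rw [pvRepl]
        intro hpre
        exact hu (List.prefix_nil.mp hpre)
      | cons c t =>
        rw [pvRepl]
        by_cases hpre : p.isPrefixOf (c :: t)
        · rw [if_pos hpre]
          cases v with
          | nil => simp at hv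
          | cons b v' =>
            simp at hv
            subst hv
            intro hbad
            cases u with
            | nil => exact hu rfl
            | cons d u' =>
              rw [List.cons_append, List.cons_prefix_cons] at hbad
              exact hc d (by simp) hbad.1
        · rw [if_neg hpre]
          intro hbad
          cases u with
          | nil => exact hu rfl
          | cons d u' =>
            rw [List.cons_prefix_cons] at hbad
            obtain ⟨rfl, hbad2⟩ := hbad
            cases u' with
            | nil => exact hnp (by simp)
            | cons e u'' =>
              refine ih t (by simp at hy; omega) (e :: u'') (by simp)
                (fun d hd => hc d (by simp [hd])) ?_ hbad2
              intro hpre2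
              exact hnp (List.cons_prefix_cons.mpr ⟨rfl, hpre2⟩)
  exact fun y => main y.length y le_rfl


lemma pvRepl_head_ne {p v : List Char} (hv : v.head? = some '%') {l : List Char}
    (hl : l.head? ≠ some '(') : (pvRepl p v l).head? ≠ some '(' := by
  cases l with
  | nil => rw [pvRepl]; simp
  | cons c t =>
    rw [pvRepl]
    by_cases hpre : p.isPrefixOf (c :: t)
    · cases v with
      | nil => simp at hv
      | cons b v' =>
        simp at hv
        subst hv
        simp [hpre]
    · simp [hpre]
      simpa using hl


lemma pvRepl_pct_step {p v : List Char} (k : List Char) (hp : p = '%' :: '(' :: k)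
    {X : List Char} (hX : X.head? ≠ some '(') :
    pvRepl p v ('%' :: X) = '%' :: pvRepl p v X := by
  apply pvRepl_not_prefix
  intro hpre
  subst hp
  rw [List.cons_prefix_cons] at hpre
  cases X with
  | nil => exact absurd hpre.2 (by simp)
  | cons b X' =>
    rw [List.cons_prefix_cons] at hpre
    exact hX (by rw [hpre.2.1]; rfl)


lemma pvRepl_pp {p v : List Char} (k : List Char) (hp : p = '%' :: '(' :: k)
    {X : List Char} (h : ¬ k <+: X) :
    pvRepl p v ('%' :: '(' :: X) = '%' :: '(' :: pvRepl p v X := by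
  rw [pvRepl_not_prefix (by
    intro hpre
    subst hp
    rw [List.cons_prefix_cons, List.cons_prefix_cons] at hpre
    exact h hpre.2.2)]
  rw [pvRepl_not_prefix (by
    intro hpre
    subst hp
    rw [List.cons_prefix_cons] at hpre
    exact absurd hpre.1 (by decide))]


lemma tdWhile_key : ∀ (k : List Char), (∀ c ∈ k, isW c = true) → ∀ (y : List Char),
    (k ++ ')' :: y).takeWhile isW = k ∧ (k ++ ')' :: y).dropWhile isW = ')' :: y := by
  intro k
  induction k with
  | nil =>
    intro _ y
    constructor <;> simp [isW]
  | cons a k' ih =>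
    intro hk y
    have ha : isW a = true := hk a (by simp)
    have := ih (fun d hd => hk d (by simp [hd])) y
    constructor <;> simp [ha, this.1, this.2]


set_option maxRecDepth 8192 in
lemma NoTok_pvRepl {p v : List Char} (hv : v.head? = some '%') {X : List Char}
    (h : NoTok X) : NoTok (pvRepl p v X) := by
  intro k hk
  refine pvRepl_noNew hv X (k ++ [')', 's']) (by simp) ?_ (h k hk)
  simp only [keysL, List.mem_cons, List.not_mem_nil, or_false] at hk
  rcases hk with rfl|rfl|rfl|rfl|rfl|rfl|rfl <;> exact all_ne_pct (by decide)


lemma pat_append (k y : List Char) : pat k ++ y = '%' :: '(' :: (k ++ ')' :: 's' :: y) := by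
  simp [pat]

lemma getD_unmapped (w : List Char) (h : ∀ k ∈ keysL, w ≠ k) :
    mappingB.getD (String.ofList w) (String.ofList w) = String.ofList w := by
  have hm : mappingB = PySem.Dict.mk
      [("artist", "uploader"), ("album", "title"), ("album_artist", "uploader"),
       ("date", "upload_date"), ("title", "title"), ("track", "1/1"), ("disc", "1/1")] := by
    decide
  have hb : ∀ (s : String), s.toList ≠ w → (s == String.ofList w) = false := by
    intro s hs
    rw [beq_eq_false_iff_ne]
    intro he
    exact hs (by rw [he, String.toList_ofList])
  have h1 := hb "artist" (fun he => h _ (by simp [keysL]) he.symm)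
  have h2 := hb "album" (fun he => h _ (by simp [keysL]) he.symm)
  have h3 := hb "album_artist" (fun he => h _ (by simp [keysL]) he.symm)
  have h4 := hb "date" (fun he => h _ (by simp [keysL]) he.symm)
  have h5 := hb "title" (fun he => h _ (by simp [keysL]) he.symm)
  have h6 := hb "track" (fun he => h _ (by simp [keysL]) he.symm)
  have h7 := hb "disc" (fun he => h _ (by simp [keysL]) he.symm)
  simp [hm, PySem.Dict.getD_eq_get?_getD, PySem.Dict.get?,
    h1, h2, h3, h4, h5, h6, h7]


lemma scanTok (k a y : List Char) (hk : ∀ c ∈ k, isW c = true) (hk0 : k ≠ [])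
    (hget : mappingB.getD (String.ofList k) (String.ofList k) = String.ofList a) :
    scanGo (pat k ++ y) = pat a ++ scanGo y := by
  have ht := tdWhile_key k hk ('s' :: y)
  rw [pat_append, scanGo]
  simp only [List.head?_cons, List.tail_cons, ht.1, ht.2]
  rw [if_pos ⟨trivial, trivial⟩, if_pos ⟨hk0, by simp⟩, hget, String.toList_ofList]
  simp [pat_append]


lemma isW_ne_pct {c : Char} (h : isW c = true) : c ≠ '%' := by
  rintro rfl
  exact absurd h (by decide)

lemma replace_eq_pvRepl' {p : List Char} (hp : p ≠ []) (v s : List Char) :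
    PySem.Chars.replace s p v = pvRepl p v s := by
  rw [PySem.Chars.replace]
  have hne : p.isEmpty = false := by simpa using hp
  rw [hne]
  simp only [Bool.false_eq_true, if_false]
  rw [go_eq_pvRepl p v hp s.length s [] le_rfl]
  simp

lemma pvRepl_pass_wtok (k w v y : List Char) (hk : ∀ c ∈ k, isW c = true)
    (hw : ∀ c ∈ w, isW c = true) (hne : k ≠ w) :
    pvRepl (pat k) v ('%' :: '(' :: (w ++ ')' :: 's' :: y)) =
      '%' :: '(' :: (w ++ ')' :: 's' :: pvRepl (pat k) v y) := by
  have hnp : ¬ (pat k) <+: ('%' :: '(' :: (w ++ ')' :: 's' :: y)) := by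
    intro hpre
    simp only [pat] at hpre
    rw [List.cons_prefix_cons, List.cons_prefix_cons] at hpre
    exact keyclash k w hk hw hne ['s'] ('s' :: y) hpre.2.2
  rw [pvRepl_not_prefix hnp]
  rw [pvRepl_cons_ne (by simp [pat]) (by decide)]
  have hchars : ∀ c ∈ w ++ [')', 's'], c ≠ '%' := by
    intro c hc
    rcases List.mem_append.mp hc with h | h
    · exact isW_ne_pct (hw c h)
    · simp at h
      rcases h with rfl | rfl <;> decide
  have h3 := pvRepl_pass_noPct (p := pat k) (v := v) (by simp [pat]) (w ++ [')', 's']) y hchars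
  simpa using h3

lemma tokA1 (y : List Char) : pvA (pat "artist".toList ++ y) = pat "uploader".toList ++ pvA y := by
  unfold pvA
  rw [pvRepl_match (p := (pat "artist".toList)) (v := (pat "uploader".toList)) (by simp [pat]) _]
  rw [pvRepl_pass_tok (p := (pat "album".toList)) (v := (pat "title".toList)) (q := (pat "uploader".toList)) (by simp [pat]) (by simp [pat]) (all_ne_pct (by decide)) (Or.inl ⟨by decide, by decide⟩) _]
  rw [pvRepl_pass_tok (p := (pat "album_artist".toList)) (v := (pat "uploader".toList)) (q := (pat "uploader".toList)) (by simp [pat]) (by simp [pat]) (all_ne_pct (by decide)) (Or.inl ⟨by decide, by decide⟩) _]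
  rw [pvRepl_pass_tok (p := (pat "date".toList)) (v := (pat "upload_date".toList)) (q := (pat "uploader".toList)) (by simp [pat]) (by simp [pat]) (all_ne_pct (by decide)) (Or.inl ⟨by decide, by decide⟩) _]
  rw [pvRepl_pass_tok (p := (pat "title".toList)) (v := (pat "title".toList)) (q := (pat "uploader".toList)) (by simp [pat]) (by simp [pat]) (all_ne_pct (by decide)) (Or.inl ⟨by decide, by decide⟩) _]
  rw [pvRepl_pass_tok (p := (pat "track".toList)) (v := (pat "1/1".toList)) (q := (pat "uploader".toList)) (by simp [pat]) (by simp [pat]) (all_ne_pct (by decide)) (Or.inl ⟨by decide, by decide⟩) _]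
  rw [pvRepl_pass_tok (p := (pat "disc".toList)) (v := (pat "1/1".toList)) (q := (pat "uploader".toList)) (by simp [pat]) (by simp [pat]) (all_ne_pct (by decide)) (Or.inl ⟨by decide, by decide⟩) _]

lemma tokA2 (y : List Char) : pvA (pat "album".toList ++ y) = pat "title".toList ++ pvA y := by
  unfold pvA
  rw [pvRepl_pass_tok (p := (pat "artist".toList)) (v := (pat "uploader".toList)) (q := (pat "album".toList)) (by simp [pat]) (by simp [pat]) (all_ne_pct (by decide)) (Or.inl ⟨by decide, by decide⟩) _]
  rw [pvRepl_match (p := (pat "album".toList)) (v := (pat "title".toList)) (by simp [pat]) _]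
  rw [pvRepl_pass_tok (p := (pat "album_artist".toList)) (v := (pat "uploader".toList)) (q := (pat "title".toList)) (by simp [pat]) (by simp [pat]) (all_ne_pct (by decide)) (Or.inl ⟨by decide, by decide⟩) _]
  rw [pvRepl_pass_tok (p := (pat "date".toList)) (v := (pat "upload_date".toList)) (q := (pat "title".toList)) (by simp [pat]) (by simp [pat]) (all_ne_pct (by decide)) (Or.inl ⟨by decide, by decide⟩) _]
  rw [pvRepl_pass_tok (p := (pat "title".toList)) (v := (pat "title".toList)) (q := (pat "title".toList)) (by simp [pat]) (by simp [pat]) (all_ne_pct (by decide)) (Or.inr ⟨rfl, rfl⟩) _]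
  rw [pvRepl_pass_tok (p := (pat "track".toList)) (v := (pat "1/1".toList)) (q := (pat "title".toList)) (by simp [pat]) (by simp [pat]) (all_ne_pct (by decide)) (Or.inl ⟨by decide, by decide⟩) _]
  rw [pvRepl_pass_tok (p := (pat "disc".toList)) (v := (pat "1/1".toList)) (q := (pat "title".toList)) (by simp [pat]) (by simp [pat]) (all_ne_pct (by decide)) (Or.inl ⟨by decide, by decide⟩) _]

lemma tokA3 (y : List Char) : pvA (pat "album_artist".toList ++ y) = pat "uploader".toList ++ pvA y := by
  unfold pvA
  rw [pvRepl_pass_tok (p := (pat "artist".toList)) (v := (pat "uploader".toList)) (q := (pat "album_artist".toList)) (by simp [pat]) (by simp [pat]) (all_ne_pct (by decide)) (Or.inl ⟨by decide, by decide⟩) _]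
  rw [pvRepl_pass_tok (p := (pat "album".toList)) (v := (pat "title".toList)) (q := (pat "album_artist".toList)) (by simp [pat]) (by simp [pat]) (all_ne_pct (by decide)) (Or.inl ⟨by decide, by decide⟩) _]
  rw [pvRepl_match (p := (pat "album_artist".toList)) (v := (pat "uploader".toList)) (by simp [pat]) _]
  rw [pvRepl_pass_tok (p := (pat "date".toList)) (v := (pat "upload_date".toList)) (q := (pat "uploader".toList)) (by simp [pat]) (by simp [pat]) (all_ne_pct (by decide)) (Or.inl ⟨by decide, by decide⟩) _]
  rw [pvRepl_pass_tok (p := (pat "title".toList)) (v := (pat "title".toList)) (q := (pat "uploader".toList)) (by simp [pat]) (by simp [pat]) (all_ne_pct (by decide)) (Or.inl ⟨by decide, by decide⟩) _]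
  rw [pvRepl_pass_tok (p := (pat "track".toList)) (v := (pat "1/1".toList)) (q := (pat "uploader".toList)) (by simp [pat]) (by simp [pat]) (all_ne_pct (by decide)) (Or.inl ⟨by decide, by decide⟩) _]
  rw [pvRepl_pass_tok (p := (pat "disc".toList)) (v := (pat "1/1".toList)) (q := (pat "uploader".toList)) (by simp [pat]) (by simp [pat]) (all_ne_pct (by decide)) (Or.inl ⟨by decide, by decide⟩) _]

lemma tokA4 (y : List Char) : pvA (pat "date".toList ++ y) = pat "upload_date".toList ++ pvA y := by
  unfold pvA
  rw [pvRepl_pass_tok (p := (pat "artist".toList)) (v := (pat "uploader".toList)) (q := (pat "date".toList)) (by simp [pat]) (by simp [pat]) (all_ne_pct (by decide)) (Or.inl ⟨by decide, by decide⟩) _]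
  rw [pvRepl_pass_tok (p := (pat "album".toList)) (v := (pat "title".toList)) (q := (pat "date".toList)) (by simp [pat]) (by simp [pat]) (all_ne_pct (by decide)) (Or.inl ⟨by decide, by decide⟩) _]
  rw [pvRepl_pass_tok (p := (pat "album_artist".toList)) (v := (pat "uploader".toList)) (q := (pat "date".toList)) (by simp [pat]) (by simp [pat]) (all_ne_pct (by decide)) (Or.inl ⟨by decide, by decide⟩) _]
  rw [pvRepl_match (p := (pat "date".toList)) (v := (pat "upload_date".toList)) (by simp [pat]) _]
  rw [pvRepl_pass_tok (p := (pat "title".toList)) (v := (pat "title".toList)) (q := (pat "upload_date".toList)) (by simp [pat]) (by simp [pat]) (all_ne_pct (by decide)) (Or.inl ⟨by decide, by decide⟩) _]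
  rw [pvRepl_pass_tok (p := (pat "track".toList)) (v := (pat "1/1".toList)) (q := (pat "upload_date".toList)) (by simp [pat]) (by simp [pat]) (all_ne_pct (by decide)) (Or.inl ⟨by decide, by decide⟩) _]
  rw [pvRepl_pass_tok (p := (pat "disc".toList)) (v := (pat "1/1".toList)) (q := (pat "upload_date".toList)) (by simp [pat]) (by simp [pat]) (all_ne_pct (by decide)) (Or.inl ⟨by decide, by decide⟩) _]

lemma tokA5 (y : List Char) : pvA (pat "title".toList ++ y) = pat "title".toList ++ pvA y := by
  unfold pvA
  rw [pvRepl_pass_tok (p := (pat "artist".toList)) (v := (pat "uploader".toList)) (q := (pat "title".toList)) (by simp [pat]) (by simp [pat]) (all_ne_pct (by decide)) (Or.inl ⟨by decide, by decide⟩) _]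
  rw [pvRepl_pass_tok (p := (pat "album".toList)) (v := (pat "title".toList)) (q := (pat "title".toList)) (by simp [pat]) (by simp [pat]) (all_ne_pct (by decide)) (Or.inl ⟨by decide, by decide⟩) _]
  rw [pvRepl_pass_tok (p := (pat "album_artist".toList)) (v := (pat "uploader".toList)) (q := (pat "title".toList)) (by simp [pat]) (by simp [pat]) (all_ne_pct (by decide)) (Or.inl ⟨by decide, by decide⟩) _]
  rw [pvRepl_pass_tok (p := (pat "date".toList)) (v := (pat "upload_date".toList)) (q := (pat "title".toList)) (by simp [pat]) (by simp [pat]) (all_ne_pct (by decide)) (Or.inl ⟨by decide, by decide⟩) _]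
  rw [pvRepl_match (p := (pat "title".toList)) (v := (pat "title".toList)) (by simp [pat]) _]
  rw [pvRepl_pass_tok (p := (pat "track".toList)) (v := (pat "1/1".toList)) (q := (pat "title".toList)) (by simp [pat]) (by simp [pat]) (all_ne_pct (by decide)) (Or.inl ⟨by decide, by decide⟩) _]
  rw [pvRepl_pass_tok (p := (pat "disc".toList)) (v := (pat "1/1".toList)) (q := (pat "title".toList)) (by simp [pat]) (by simp [pat]) (all_ne_pct (by decide)) (Or.inl ⟨by decide, by decide⟩) _]

lemma tokA6 (y : List Char) : pvA (pat "track".toList ++ y) = pat "1/1".toList ++ pvA y := by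
  unfold pvA
  rw [pvRepl_pass_tok (p := (pat "artist".toList)) (v := (pat "uploader".toList)) (q := (pat "track".toList)) (by simp [pat]) (by simp [pat]) (all_ne_pct (by decide)) (Or.inl ⟨by decide, by decide⟩) _]
  rw [pvRepl_pass_tok (p := (pat "album".toList)) (v := (pat "title".toList)) (q := (pat "track".toList)) (by simp [pat]) (by simp [pat]) (all_ne_pct (by decide)) (Or.inl ⟨by decide, by decide⟩) _]
  rw [pvRepl_pass_tok (p := (pat "album_artist".toList)) (v := (pat "uploader".toList)) (q := (pat "track".toList)) (by simp [pat]) (by simp [pat]) (all_ne_pct (by decide)) (Or.inl ⟨by decide, by decide⟩) _]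
  rw [pvRepl_pass_tok (p := (pat "date".toList)) (v := (pat "upload_date".toList)) (q := (pat "track".toList)) (by simp [pat]) (by simp [pat]) (all_ne_pct (by decide)) (Or.inl ⟨by decide, by decide⟩) _]
  rw [pvRepl_pass_tok (p := (pat "title".toList)) (v := (pat "title".toList)) (q := (pat "track".toList)) (by simp [pat]) (by simp [pat]) (all_ne_pct (by decide)) (Or.inl ⟨by decide, by decide⟩) _]
  rw [pvRepl_match (p := (pat "track".toList)) (v := (pat "1/1".toList)) (by simp [pat]) _]
  rw [pvRepl_pass_tok (p := (pat "disc".toList)) (v := (pat "1/1".toList)) (q := (pat "1/1".toList)) (by simp [pat]) (by simp [pat]) (all_ne_pct (by decide)) (Or.inl ⟨by decide, by decide⟩) _]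

lemma tokA7 (y : List Char) : pvA (pat "disc".toList ++ y) = pat "1/1".toList ++ pvA y := by
  unfold pvA
  rw [pvRepl_pass_tok (p := (pat "artist".toList)) (v := (pat "uploader".toList)) (q := (pat "disc".toList)) (by simp [pat]) (by simp [pat]) (all_ne_pct (by decide)) (Or.inl ⟨by decide, by decide⟩) _]
  rw [pvRepl_pass_tok (p := (pat "album".toList)) (v := (pat "title".toList)) (q := (pat "disc".toList)) (by simp [pat]) (by simp [pat]) (all_ne_pct (by decide)) (Or.inl ⟨by decide, by decide⟩) _]
  rw [pvRepl_pass_tok (p := (pat "album_artist".toList)) (v := (pat "uploader".toList)) (q := (pat "disc".toList)) (by simp [pat]) (by simp [pat]) (all_ne_pct (by decide)) (Or.inl ⟨by decide, by decide⟩) _]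
  rw [pvRepl_pass_tok (p := (pat "date".toList)) (v := (pat "upload_date".toList)) (q := (pat "disc".toList)) (by simp [pat]) (by simp [pat]) (all_ne_pct (by decide)) (Or.inl ⟨by decide, by decide⟩) _]
  rw [pvRepl_pass_tok (p := (pat "title".toList)) (v := (pat "title".toList)) (q := (pat "disc".toList)) (by simp [pat]) (by simp [pat]) (all_ne_pct (by decide)) (Or.inl ⟨by decide, by decide⟩) _]
  rw [pvRepl_pass_tok (p := (pat "track".toList)) (v := (pat "1/1".toList)) (q := (pat "disc".toList)) (by simp [pat]) (by simp [pat]) (all_ne_pct (by decide)) (Or.inl ⟨by decide, by decide⟩) _]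
  rw [pvRepl_match (p := (pat "disc".toList)) (v := (pat "1/1".toList)) (by simp [pat]) _]

lemma wtokA (w y : List Char) (hw : ∀ c ∈ w, isW c = true)
    (hne : ∀ k ∈ keysL, w ≠ k) : pvA (pat w ++ y) = pat w ++ pvA y := by
  rw [pat_append, pat_append]
  unfold pvA
  rw [pvRepl_pass_wtok "artist".toList w (pat "uploader".toList) _ (all_isW (by decide)) hw (fun he => hne _ (by simp [keysL]) he.symm)]
  rw [pvRepl_pass_wtok "album".toList w (pat "title".toList) _ (all_isW (by decide)) hw (fun he => hne _ (by simp [keysL]) he.symm)]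
  rw [pvRepl_pass_wtok "album_artist".toList w (pat "uploader".toList) _ (all_isW (by decide)) hw (fun he => hne _ (by simp [keysL]) he.symm)]
  rw [pvRepl_pass_wtok "date".toList w (pat "upload_date".toList) _ (all_isW (by decide)) hw (fun he => hne _ (by simp [keysL]) he.symm)]
  rw [pvRepl_pass_wtok "title".toList w (pat "title".toList) _ (all_isW (by decide)) hw (fun he => hne _ (by simp [keysL]) he.symm)]
  rw [pvRepl_pass_wtok "track".toList w (pat "1/1".toList) _ (all_isW (by decide)) hw (fun he => hne _ (by simp [keysL]) he.symm)]
  rw [pvRepl_pass_wtok "disc".toList w (pat "1/1".toList) _ (all_isW (by decide)) hw (fun he => hne _ (by simp [keysL]) he.symm)]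

lemma chainA_ne (c : Char) (hc : c ≠ '%') (t : List Char) : pvA (c :: t) = c :: pvA t := by
  unfold pvA
  rw [pvRepl_cons_ne (p := (pat "artist".toList)) (v := (pat "uploader".toList)) (by simp [pat]) hc]
  rw [pvRepl_cons_ne (p := (pat "album".toList)) (v := (pat "title".toList)) (by simp [pat]) hc]
  rw [pvRepl_cons_ne (p := (pat "album_artist".toList)) (v := (pat "uploader".toList)) (by simp [pat]) hc]
  rw [pvRepl_cons_ne (p := (pat "date".toList)) (v := (pat "upload_date".toList)) (by simp [pat]) hc]
  rw [pvRepl_cons_ne (p := (pat "title".toList)) (v := (pat "title".toList)) (by simp [pat]) hc]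
  rw [pvRepl_cons_ne (p := (pat "track".toList)) (v := (pat "1/1".toList)) (by simp [pat]) hc]
  rw [pvRepl_cons_ne (p := (pat "disc".toList)) (v := (pat "1/1".toList)) (by simp [pat]) hc]

lemma chainA_pct (t : List Char) (ht : t.head? ≠ some '(') : pvA ('%' :: t) = '%' :: pvA t := by
  unfold pvA
  have h0 := ht
  rw [pvRepl_pct_step (p := (pat "artist".toList)) (v := (pat "uploader".toList)) _ rfl h0]
  have h1 := pvRepl_head_ne (p := (pat "artist".toList)) (v := (pat "uploader".toList)) (by simp [pat]) h0
  rw [pvRepl_pct_step (p := (pat "album".toList)) (v := (pat "title".toList)) _ rfl h1]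
  have h2 := pvRepl_head_ne (p := (pat "album".toList)) (v := (pat "title".toList)) (by simp [pat]) h1
  rw [pvRepl_pct_step (p := (pat "album_artist".toList)) (v := (pat "uploader".toList)) _ rfl h2]
  have h3 := pvRepl_head_ne (p := (pat "album_artist".toList)) (v := (pat "uploader".toList)) (by simp [pat]) h2
  rw [pvRepl_pct_step (p := (pat "date".toList)) (v := (pat "upload_date".toList)) _ rfl h3]
  have h4 := pvRepl_head_ne (p := (pat "date".toList)) (v := (pat "upload_date".toList)) (by simp [pat]) h3
  rw [pvRepl_pct_step (p := (pat "title".toList)) (v := (pat "title".toList)) _ rfl h4]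
  have h5 := pvRepl_head_ne (p := (pat "title".toList)) (v := (pat "title".toList)) (by simp [pat]) h4
  rw [pvRepl_pct_step (p := (pat "track".toList)) (v := (pat "1/1".toList)) _ rfl h5]
  have h6 := pvRepl_head_ne (p := (pat "track".toList)) (v := (pat "1/1".toList)) (by simp [pat]) h5
  rw [pvRepl_pct_step (p := (pat "disc".toList)) (v := (pat "1/1".toList)) _ rfl h6]

lemma chainA_pp (r : List Char) (h : NoTok r) : pvA ('%' :: '(' :: r) = '%' :: '(' :: pvA r := by
  unfold pvA
  have n0 := h
  rw [pvRepl_pp (p := (pat "artist".toList)) (v := (pat "uploader".toList)) _ rfl (n0 _ (by simp [keysL]))]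
  have n1 := NoTok_pvRepl (p := (pat "artist".toList)) (v := (pat "uploader".toList)) (by simp [pat]) n0
  rw [pvRepl_pp (p := (pat "album".toList)) (v := (pat "title".toList)) _ rfl (n1 _ (by simp [keysL]))]
  have n2 := NoTok_pvRepl (p := (pat "album".toList)) (v := (pat "title".toList)) (by simp [pat]) n1
  rw [pvRepl_pp (p := (pat "album_artist".toList)) (v := (pat "uploader".toList)) _ rfl (n2 _ (by simp [keysL]))]
  have n3 := NoTok_pvRepl (p := (pat "album_artist".toList)) (v := (pat "uploader".toList)) (by simp [pat]) n2
  rw [pvRepl_pp (p := (pat "date".toList)) (v := (pat "upload_date".toList)) _ rfl (n3 _ (by simp [keysL]))]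
  have n4 := NoTok_pvRepl (p := (pat "date".toList)) (v := (pat "upload_date".toList)) (by simp [pat]) n3
  rw [pvRepl_pp (p := (pat "title".toList)) (v := (pat "title".toList)) _ rfl (n4 _ (by simp [keysL]))]
  have n5 := NoTok_pvRepl (p := (pat "title".toList)) (v := (pat "title".toList)) (by simp [pat]) n4
  rw [pvRepl_pp (p := (pat "track".toList)) (v := (pat "1/1".toList)) _ rfl (n5 _ (by simp [keysL]))]
  have n6 := NoTok_pvRepl (p := (pat "track".toList)) (v := (pat "1/1".toList)) (by simp [pat]) n5
  rw [pvRepl_pp (p := (pat "disc".toList)) (v := (pat "1/1".toList)) _ rfl (n6 _ (by simp [keysL]))]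

lemma scanGo_not_tok {c : Char} {t : List Char} (h : ¬ (c = '%' ∧ t.head? = some '(')) :
    scanGo (c :: t) = c :: scanGo t := by
  rw [scanGo, if_neg h]

lemma scanGo_fail {r : List Char}
    (h : ¬ (r.takeWhile isW ≠ [] ∧ (r.dropWhile isW).take 2 = [')', 's'])) :
    scanGo ('%' :: '(' :: r) = '%' :: scanGo ('(' :: r) := by
  rw [scanGo]
  simp only [List.head?_cons, List.tail_cons]
  rw [if_pos ⟨trivial, trivial⟩, if_neg h]

lemma mainAux : ∀ (n : Nat) (l : List Char), l.length ≤ n → pvA l = scanGo l := by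
  intro n
  induction n with
  | zero =>
    intro l hl
    have hnil : l = [] := by cases l <;> simp_all
    subst hnil
    unfold pvA
    simp [pvRepl, scanGo]
  | succ n ih =>
    intro l hl
    cases l with
    | nil =>
      unfold pvA
      simp [pvRepl, scanGo]
    | cons c t =>
      by_cases hct : c = '%' ∧ t.head? = some '('
      · obtain ⟨rfl, hth⟩ := hct
        obtain ⟨r, rfl⟩ : ∃ r, t = '(' :: r := by
          cases t with
          | nil => simp at hth
          | cons a r =>
            simp at hth
            exact ⟨r, by rw [hth]⟩
        by_cases hm : r.takeWhile isW ≠ [] ∧ (r.dropWhile isW).take 2 = [')', 's']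
        · have hr : r = r.takeWhile isW ++ ')' :: 's' :: (r.dropWhile isW).drop 2 := by
            conv_lhs => rw [← List.takeWhile_append_dropWhile (p := isW) (l := r)]
            congr 1
            conv_lhs => rw [← List.take_append_drop 2 (r.dropWhile isW)]
            rw [hm.2]
            rfl
          have hw : ∀ c ∈ r.takeWhile isW, isW c = true := fun c hc => List.mem_takeWhile_imp hc
          have hlen : ((r.dropWhile isW).drop 2).length ≤ n := by
            have h1 : (r.dropWhile isW).length ≤ r.length := (List.dropWhile_sublist _).length_le
            simp only [List.length_cons] at hl
            simp only [List.length_drop]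
            omega
          by_cases hkm : r.takeWhile isW ∈ keysL
          · simp only [keysL, List.mem_cons, List.not_mem_nil, or_false] at hkm
            rcases hkm with he|he|he|he|he|he|he
            · rw [hr, he, ← pat_append, tokA1,
                scanTok "artist".toList "uploader".toList _ (all_isW (by decide)) (by decide) (by decide), ih _ hlen]
            · rw [hr, he, ← pat_append, tokA2,
                scanTok "album".toList "title".toList _ (all_isW (by decide)) (by decide) (by decide), ih _ hlen]
            · rw [hr, he, ← pat_append, tokA3,
                scanTok "album_artist".toList "uploader".toList _ (all_isW (by decide)) (by decide) (by decide), ih _ hlen]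
            · rw [hr, he, ← pat_append, tokA4,
                scanTok "date".toList "upload_date".toList _ (all_isW (by decide)) (by decide) (by decide), ih _ hlen]
            · rw [hr, he, ← pat_append, tokA5,
                scanTok "title".toList "title".toList _ (all_isW (by decide)) (by decide) (by decide), ih _ hlen]
            · rw [hr, he, ← pat_append, tokA6,
                scanTok "track".toList "1/1".toList _ (all_isW (by decide)) (by decide) (by decide), ih _ hlen]
            · rw [hr, he, ← pat_append, tokA7,
                scanTok "disc".toList "1/1".toList _ (all_isW (by decide)) (by decide) (by decide), ih _ hlen]
          · have hne : ∀ k ∈ keysL, r.takeWhile isW ≠ k := fun k hk he => hkm (he ▸ hk)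
            rw [hr, ← pat_append, wtokA _ _ hw hne,
              scanTok _ _ _ hw hm.1 (getD_unmapped _ hne), ih _ hlen]
        · have hNo : NoTok r := by
            intro k hk hpre
            obtain ⟨t₂, ht₂⟩ := hpre
            have hkW : ∀ c ∈ k, isW c = true := by
              simp only [keysL, List.mem_cons, List.not_mem_nil, or_false] at hk
              rcases hk with rfl|rfl|rfl|rfl|rfl|rfl|rfl <;> exact all_isW (by decide)
            have hk0 : k ≠ [] := by
              simp only [keysL, List.mem_cons, List.not_mem_nil, or_false] at hk
              rcases hk with rfl|rfl|rfl|rfl|rfl|rfl|rfl <;> simp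
            have hshape : r = k ++ ')' :: 's' :: t₂ := by
              rw [← ht₂]
              simp
            have htd := tdWhile_key k hkW ('s' :: t₂)
            apply hm
            constructor
            · rw [hshape, htd.1]
              exact hk0
            · rw [hshape, htd.2]
              rfl
          rw [chainA_pp r hNo, scanGo_fail hm,
            scanGo_not_tok (by simp), ih r (by simp at hl; omega)]
      · by_cases hc : c = '%'
        · subst hc
          have hth : t.head? ≠ some '(' := fun h => hct ⟨rfl, h⟩
          rw [chainA_pct t hth, scanGo_not_tok hct, ih t (by simp at hl; omega)]
        · rw [chainA_ne c hc t, scanGo_not_tok (fun h => hc h.1), ih t (by simp at hl; omega)]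


lemma portA_eq (s : String) : remap_template_keys s = String.ofList (pvA s.toList) := by
  simp only [remap_template_keys, TRACK_METADATA_ATTRIBUTE_MAP,
    List.foldl_cons, List.foldl_nil]
  simp only [PySem.Str.replace, fmtKey, String.toList_ofList]
  rw [replace_eq_pvRepl' (by simp), replace_eq_pvRepl' (by simp), replace_eq_pvRepl' (by simp),
    replace_eq_pvRepl' (by simp), replace_eq_pvRepl' (by simp), replace_eq_pvRepl' (by simp),
    replace_eq_pvRepl' (by simp)]
  rfl


-- ===== VERDICT (by name: the statement is the Claim_ definition above) =====
theorem remap_template_keys_spec : Claim_equal_remap_template_keys := by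
  intro template _
  unfold Spec_remap_template_keys remap_template_keys_alt
  rw [portA_eq, mainAux template.toList.length template.toList le_rfl]
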